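-- pv_equiv track=rewrite | github.com/ArxKnight/diskwarden | scanner.py | parse_hd_sentinel_output
-- ===== SOURCE A (Python) =====
-- from typing import List, Dict, Any, Tuple
--
-- def parse_hd_sentinel_output(output: str) -> List[Dict[str, Any]]:
--     """
--     Parse HDSentinel CLI output into a list of disk dictionaries.
--
--     Args:
--         output: Raw output from HDSentinel -r command
--
--     Returns:
--         List of disk dictionaries with parsed fields
--     """
--     disks = []
--     lines = output.splitlines()
--     disk = {}
--
--     for line in lines:
--         if line.startswith("HDD Device"):
--             if disk:
--                 disks.append(disk)
--                 disk = {}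
--             disk['device'] = line.split(":", 1)[1].strip() if ":" in line else ""
--         elif line.startswith("HDD Model ID"):
--             disk['model_id'] = line.split(":", 1)[1].strip() if ":" in line else ""
--         elif line.startswith("HDD Serial No"):
--             disk['serial_no'] = line.split(":", 1)[1].strip() if ":" in line else ""
--         elif line.startswith("HDD Size"):
--             disk['size'] = line.split(":", 1)[1].strip() if ":" in line else ""
--         elif line.startswith("Temperature"):
--             disk['temperature'] = line.split(":", 1)[1].strip() if ":" in line else ""
--         elif line.startswith("Highest Temp"):
--             disk['highest_temp'] = line.split(":", 1)[1].strip() if ":" in line else ""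
--         elif line.startswith("Health"):
--             disk['health'] = line.split(":", 1)[1].strip() if ":" in line else ""
--         elif line.startswith("Performance"):
--             disk['performance'] = line.split(":", 1)[1].strip() if ":" in line else ""
--         elif line.startswith("Power on time"):
--             disk['power_on_time'] = line.split(":", 1)[1].strip() if ":" in line else ""
--         elif line.startswith("Est. lifetime"):
--             disk['lifetime'] = line.split(":", 1)[1].strip() if ":" in line else ""
--
--     if disk:
--         disks.append(disk)
--
--     return disks
-- ===== SOURCE B (Python) =====
-- def parse_hd_sentinel_output(output: str):
--     """Two-phase parse: split lines into per-disk blocks at 'HDD Device'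
--     boundaries, then build each disk dict from its block via a prefix->key table."""
--     FIELDS = {
--         "HDD Device": "device",
--         "HDD Model ID": "model_id",
--         "HDD Serial No": "serial_no",
--         "HDD Size": "size",
--         "Temperature": "temperature",
--         "Highest Temp": "highest_temp",
--         "Health": "health",
--         "Performance": "performance",
--         "Power on time": "power_on_time",
--         "Est. lifetime": "lifetime",
--     }
--     blocks = [[]]
--     for line in output.splitlines():
--         if line.startswith("HDD Device"):
--             blocks.append([])
--         blocks[-1].append(line)
--     disks = []
--     for block in blocks:
--         disk = {}
--         for line in block:
--             for prefix, key in FIELDS.items():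
--                 if line.startswith(prefix):
--                     disk[key] = line.split(":", 1)[1].strip() if ":" in line else ""
--                     break
--         if disk:
--             disks.append(disk)
--     return disks
-- ===== Notes on version B (the rewrite author's own statement) =====
-- stated objective: alternative
-- what changed: Replaces A's single-pass if/elif ladder with flush/reset dict state by a two-phase parse: first split the lines into per-disk blocks at device-header boundaries, then build each disk dict from its block with a table-driven prefix->key lookup, filtering out the empty block.
import Mathlib
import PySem

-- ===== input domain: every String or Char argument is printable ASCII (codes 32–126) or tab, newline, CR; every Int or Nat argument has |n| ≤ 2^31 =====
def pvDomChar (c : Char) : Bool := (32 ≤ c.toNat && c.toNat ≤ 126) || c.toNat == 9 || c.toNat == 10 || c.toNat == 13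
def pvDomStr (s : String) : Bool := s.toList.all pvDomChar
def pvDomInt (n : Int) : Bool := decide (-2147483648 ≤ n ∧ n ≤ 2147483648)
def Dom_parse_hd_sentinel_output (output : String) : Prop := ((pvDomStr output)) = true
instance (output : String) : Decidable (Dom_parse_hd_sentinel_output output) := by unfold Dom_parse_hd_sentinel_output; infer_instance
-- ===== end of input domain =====

-- B replaces A's single-pass flush/reset accumulator by a two-phase parse (split into per-disk
-- blocks, then a table-driven block parser); objective: idiomatic/alternative, same cost.

-- shared helper: the IDENTICAL Python expression «line.split(":", 1)[1].strip() if ":" in line else ""» in both sources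
def pvVal (line : String) : String :=
  if PySem.Str.isIn ":" line then
    PySem.Str.strip (((PySem.Str.splitMax? line ":" 1).getD []).getD 1 "")
  else ""

-- ===== PORT A =====
def pvStepA (st : List (PySem.Dict String String) × PySem.Dict String String) (line : String) :
    List (PySem.Dict String String) × PySem.Dict String String :=
  let (disks, disk) := st
  if PySem.Str.startswith line "HDD Device" then
    let (disks, disk) := if disk.items ≠ [] then (disks ++ [disk], PySem.Dict.empty) else (disks, disk)
    (disks, disk.insert "device" (pvVal line))
  else if PySem.Str.startswith line "HDD Model ID" then (disks, disk.insert "model_id" (pvVal line))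
  else if PySem.Str.startswith line "HDD Serial No" then (disks, disk.insert "serial_no" (pvVal line))
  else if PySem.Str.startswith line "HDD Size" then (disks, disk.insert "size" (pvVal line))
  else if PySem.Str.startswith line "Temperature" then (disks, disk.insert "temperature" (pvVal line))
  else if PySem.Str.startswith line "Highest Temp" then (disks, disk.insert "highest_temp" (pvVal line))
  else if PySem.Str.startswith line "Health" then (disks, disk.insert "health" (pvVal line))
  else if PySem.Str.startswith line "Performance" then (disks, disk.insert "performance" (pvVal line))
  else if PySem.Str.startswith line "Power on time" then (disks, disk.insert "power_on_time" (pvVal line))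
  else if PySem.Str.startswith line "Est. lifetime" then (disks, disk.insert "lifetime" (pvVal line))
  else (disks, disk)

def parse_hd_sentinel_output (output : String) : List (List (String × String)) :=
  let lines := PySem.Str.splitlines output
  let st := lines.foldl pvStepA ([], PySem.Dict.empty)
  let disks := if st.2.items ≠ [] then st.1 ++ [st.2] else st.1
  disks.map (·.items)

-- ===== PORT B =====
def pvFields : List (String × String) :=
  [("HDD Device", "device"), ("HDD Model ID", "model_id"), ("HDD Serial No", "serial_no"),
   ("HDD Size", "size"), ("Temperature", "temperature"), ("Highest Temp", "highest_temp"),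
   ("Health", "health"), ("Performance", "performance"), ("Power on time", "power_on_time"),
   ("Est. lifetime", "lifetime")]

-- inner «for prefix, key in FIELDS.items(): if line.startswith(prefix): …; break»
def pvParseStep (disk : PySem.Dict String String) (line : String) : PySem.Dict String String :=
  match pvFields.find? (fun pk => PySem.Str.startswith line pk.1) with
  | some pk => disk.insert pk.2 (pvVal line)
  | none => disk

-- blocks=[[]]; append [] at a device line; always append the line to blocks[-1]
def pvBlockStep (st : List (List String) × List String) (line : String) :
    List (List String) × List String :=
  let (bs, cur) := st
  if PySem.Str.startswith line "HDD Device" then (bs ++ [cur], [line]) else (bs, cur ++ [line])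

def parse_hd_sentinel_output_alt (output : String) : List (List (String × String)) :=
  let st := (PySem.Str.splitlines output).foldl pvBlockStep ([], [])
  let blocks := st.1 ++ [st.2]
  let disks := blocks.foldl (fun disks block =>
      let disk := block.foldl pvParseStep PySem.Dict.empty
      if disk.items ≠ [] then disks ++ [disk] else disks) []
  disks.map (·.items)

-- ===== PRECONDITION & SPEC =====
def Spec_parse_hd_sentinel_output (output : String) (out : List (List (String × String))) : Prop := out = parse_hd_sentinel_output_alt output
instance (output : String) (out : List (List (String × String))) : Decidable (Spec_parse_hd_sentinel_output output out) := by unfold Spec_parse_hd_sentinel_output; infer_instance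

-- ===== CLAIM (what is proved, stated in full; the proofs are below) =====
def Claim_equal_parse_hd_sentinel_output : Prop := ∀ (output : String), Dom_parse_hd_sentinel_output output → Spec_parse_hd_sentinel_output output (parse_hd_sentinel_output output)

-- ===== LEMMAS AND PROOFS =====

-- the piece of output contributed by one finished dict / one block
def pvPiece' (d : PySem.Dict String String) : List (PySem.Dict String String) :=
  if d.items ≠ [] then [d] else []

def pvPiece (blk : List String) : List (PySem.Dict String String) :=
  pvPiece' (blk.foldl pvParseStep PySem.Dict.empty)

lemma parseStep_dev (d : PySem.Dict String String) (l : String)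
    (h : PySem.Str.startswith l "HDD Device" = true) :
    pvParseStep d l = d.insert "device" (pvVal l) := by
  simp only [pvParseStep, pvFields, List.find?_cons, h]

lemma stepA_eq (s : List (PySem.Dict String String)) (d : PySem.Dict String String) (l : String)
    (h : PySem.Str.startswith l "HDD Device" = false) :
    pvStepA (s, d) l = (s, pvParseStep d l) := by
  simp only [pvStepA, pvParseStep, pvFields, List.find?_cons, List.find?_nil, h,
    Bool.false_eq_true, if_false]
  split_ifs <;> simp_all [Bool.not_eq_true]

lemma stepA_dev (s : List (PySem.Dict String String)) (d : PySem.Dict String String) (l : String)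
    (h : PySem.Str.startswith l "HDD Device" = true) :
    pvStepA (s, d) l = (s ++ pvPiece' d, PySem.Dict.empty.insert "device" (pvVal l)) := by
  simp only [pvStepA, pvPiece', h, if_true]
  by_cases hd : d.items = []
  · have hde : d = PySem.Dict.empty := PySem.Dict.ext (hd.trans rfl)
    subst hde
    simp [PySem.Dict.empty]
  · simp [hd]

lemma foldlA_acc (lines : List String) :
    ∀ (s : List (PySem.Dict String String)) (d : PySem.Dict String String),
    lines.foldl pvStepA (s, d) =
      (s ++ (lines.foldl pvStepA ([], d)).1, (lines.foldl pvStepA ([], d)).2) := by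
  induction lines with
  | nil => intro s d; simp
  | cons l ls ih =>
    intro s d
    by_cases h : PySem.Str.startswith l "HDD Device" = true
    · simp only [List.foldl_cons, stepA_dev _ _ _ h]
      rw [ih (s ++ pvPiece' d), ih ([] ++ pvPiece' d)]
      simp only [List.nil_append, List.append_assoc]
    · simp only [List.foldl_cons, stepA_eq _ _ _ (by simpa using h)]
      rw [ih s]

lemma foldlBlk_acc (lines : List String) :
    ∀ (bs : List (List String)) (cur : List String),
    lines.foldl pvBlockStep (bs, cur) =
      (bs ++ (lines.foldl pvBlockStep ([], cur)).1, (lines.foldl pvBlockStep ([], cur)).2) := by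
  induction lines with
  | nil => intro bs cur; simp
  | cons l ls ih =>
    intro bs cur
    by_cases h : PySem.Str.startswith l "HDD Device" = true
    · simp only [List.foldl_cons, pvBlockStep, h, if_true]
      rw [ih (bs ++ [cur]), ih ([] ++ [cur])]
      simp only [List.nil_append, List.append_assoc]
    · have hb : PySem.Str.startswith l "HDD Device" = false := by simpa using h
      simp only [List.foldl_cons, pvBlockStep, hb, Bool.false_eq_true, if_false]
      exact ih bs (cur ++ [l])

lemma collect_eq_flatMap (blocks : List (List String)) :
    ∀ (ds : List (PySem.Dict String String)),
    blocks.foldl (fun disks block =>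
      let disk := block.foldl pvParseStep PySem.Dict.empty
      if disk.items ≠ [] then disks ++ [disk] else disks) ds = ds ++ blocks.flatMap pvPiece := by
  induction blocks with
  | nil => intro ds; simp
  | cons b bs ih =>
    intro ds
    simp only [List.foldl_cons, List.flatMap_cons, ih]
    simp only [pvPiece, pvPiece']
    split_ifs <;> simp

lemma main_lemma (lines : List String) :
    ∀ (cur : List String),
    (lines.foldl pvStepA ([], cur.foldl pvParseStep PySem.Dict.empty)).1 ++
      pvPiece' (lines.foldl pvStepA ([], cur.foldl pvParseStep PySem.Dict.empty)).2 =
    ((lines.foldl pvBlockStep ([], cur)).1 ++ [(lines.foldl pvBlockStep ([], cur)).2]).flatMap pvPiece := by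
  induction lines with
  | nil => intro cur; simp [pvPiece]
  | cons l ls ih =>
    intro cur
    by_cases h : PySem.Str.startswith l "HDD Device" = true
    · simp only [List.foldl_cons, stepA_dev _ _ _ h, pvBlockStep, h, if_true, List.nil_append]
      have h1 : PySem.Dict.empty.insert "device" (pvVal l) =
          [l].foldl pvParseStep PySem.Dict.empty := by
        simp only [List.foldl_cons, List.foldl_nil, parseStep_dev _ _ h]
      rw [h1,
        foldlA_acc ls (pvPiece' (cur.foldl pvParseStep PySem.Dict.empty))
          ([l].foldl pvParseStep PySem.Dict.empty),
        foldlBlk_acc ls [cur] [l]]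
      have hp : pvPiece' (cur.foldl pvParseStep PySem.Dict.empty) = pvPiece cur := rfl
      have ht := ih [l]
      simp only [List.flatMap_append, List.flatMap_cons, List.flatMap_nil, List.append_nil] at ht ⊢
      simp only [List.append_assoc, hp, ht]
    · have hb : PySem.Str.startswith l "HDD Device" = false := by simpa using h
      simp only [List.foldl_cons, stepA_eq _ _ _ hb, pvBlockStep, hb, Bool.false_eq_true, if_false]
      have h2 : pvParseStep (cur.foldl pvParseStep PySem.Dict.empty) l =
          (cur ++ [l]).foldl pvParseStep PySem.Dict.empty := by
        simp [List.foldl_append]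
      rw [h2]
      exact ih (cur ++ [l])

-- ===== VERDICT (by name: the statement is the Claim_ definition above) =====
theorem parse_hd_sentinel_output_spec : Claim_equal_parse_hd_sentinel_output := by
  intro output _
  show parse_hd_sentinel_output output = parse_hd_sentinel_output_alt output
  simp only [parse_hd_sentinel_output, parse_hd_sentinel_output_alt]
  rw [collect_eq_flatMap]
  have hm := main_lemma (PySem.Str.splitlines output) []
  simp only [List.foldl_nil] at hm
  have hfin : (if ((PySem.Str.splitlines output).foldl pvStepA ([], PySem.Dict.empty)).2.items ≠ []
      then ((PySem.Str.splitlines output).foldl pvStepA ([], PySem.Dict.empty)).1 ++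
        [((PySem.Str.splitlines output).foldl pvStepA ([], PySem.Dict.empty)).2]
      else ((PySem.Str.splitlines output).foldl pvStepA ([], PySem.Dict.empty)).1) =
      ((PySem.Str.splitlines output).foldl pvStepA ([], PySem.Dict.empty)).1 ++
        pvPiece' ((PySem.Str.splitlines output).foldl pvStepA ([], PySem.Dict.empty)).2 := by
    simp only [pvPiece']; split_ifs <;> simp
  simp only [hfin, hm, List.nil_append]
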